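-- pv_equiv track=rewrite | github.com/hoopstreet/ish-dev | system/agent.py | split_phases
-- ===== SOURCE A (Python) =====
-- def split_phases(code):
--     phases, current = [], []
--     for line in code.split("\n"):
--         if line.lower().startswith("# phase"):
--             if current:
--                 phases.append("\n".join(current))
--                 current = []
--         current.append(line)
--     if current:
--         phases.append("\n".join(current))
--     return phases
-- ===== SOURCE B (Python) =====
-- def split_phases(code):
--     # Staged: find marker line indices (skipping index 0), then slice the line
--     # list between consecutive boundaries and join each segment.
--     lines = code.split("\n")
--     bounds = [i for i, line in enumerate(lines)
--               if i > 0 and line.lower().startswith("# phase")]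
--     return ["\n".join(lines[a:b]) for a, b in zip([0] + bounds, bounds + [len(lines)])]
-- ===== Notes on version B (the rewrite author's own statement) =====
-- stated objective: alternative
-- what changed: B replaces A's single stateful scan (accumulate lines, flush the pending chunk before each marker) by a staged pipeline: enumerate the marker-line boundary indices (skipping index 0), pair consecutive boundaries, and slice-and-join the line list between them.
import Mathlib
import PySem

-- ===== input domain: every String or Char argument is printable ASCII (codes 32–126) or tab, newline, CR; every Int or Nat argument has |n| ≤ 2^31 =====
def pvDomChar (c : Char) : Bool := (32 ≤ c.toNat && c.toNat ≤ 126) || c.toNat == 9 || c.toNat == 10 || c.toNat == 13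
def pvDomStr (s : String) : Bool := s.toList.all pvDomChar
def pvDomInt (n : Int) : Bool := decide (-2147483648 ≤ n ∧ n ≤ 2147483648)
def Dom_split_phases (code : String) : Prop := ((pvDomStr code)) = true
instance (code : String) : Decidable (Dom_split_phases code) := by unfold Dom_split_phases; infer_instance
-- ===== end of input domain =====

-- B replaces A's single stateful scan (flush the pending chunk before each marker) by a
-- staged pipeline: enumerate marker-line boundary indices (skipping index 0), then slice
-- the line list between consecutive boundaries; same value, alternative decomposition.

-- ===== PORT A =====
def split_phases (code : String) : List String :=
  let st := ((PySem.Str.split? code "\n").getD []).foldl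
    (fun (st : List String × List String) line =>
      let st :=
        if PySem.Str.startswith (PySem.Str.lower line) "# phase" then
          (if st.2 ≠ [] then (st.1 ++ [PySem.Str.join "\n" st.2], ([] : List String)) else st)
        else st
      (st.1, st.2 ++ [line])) ([], [])
  if st.2 ≠ [] then st.1 ++ [PySem.Str.join "\n" st.2] else st.1

-- ===== PORT B =====
def split_phases_alt (code : String) : List String :=
  let lines := (PySem.Str.split? code "\n").getD []
  let bounds := ((PySem.List.enumerate lines).filter
      (fun il => decide ((0 : Int) < il.1) &&
        PySem.Str.startswith (PySem.Str.lower il.2) "# phase")).map (·.1)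
  (((0 : Int) :: bounds).zip (bounds ++ [PySem.List.len lines])).map
    (fun ab => PySem.Str.join "\n" (PySem.List.slice lines (some ab.1) (some ab.2)))

-- ===== PRECONDITION & SPEC =====
def Spec_split_phases (code : String) (out : List String) : Prop := out = split_phases_alt code
instance (code : String) (out : List String) : Decidable (Spec_split_phases code out) := by unfold Spec_split_phases; infer_instance

-- ===== CLAIM (what is proved, stated in full; the proofs are below) =====
def Claim_equal_split_phases : Prop := ∀ (code : String), Dom_split_phases code → Spec_split_phases code (split_phases code)

-- ===== LEMMAS AND PROOFS =====

-- generic version of A's loop body (p = marker test, j = "\n".join)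
def pvFA (p : String → Bool) (j : List String → String)
    (st : List String × List String) (line : String) : List String × List String :=
  let st := if p line then (if st.2 ≠ [] then (st.1 ++ [j st.2], ([] : List String)) else st) else st
  (st.1, st.2 ++ [line])

-- forward grouping: the common functional specification of both programs
def pvH (p : String → Bool) (j : List String → String) (cur : List String) :
    List String → List String
  | [] => [j cur]
  | x :: xs => if p x then j cur :: pvH p j [x] xs else pvH p j (cur ++ [x]) xs

-- positions (counted from s) of the marker lines of a list — B's "bounds"
def pvMarks (p : String → Bool) : List String → Nat → List Nat
  | [], _ => []
  | y :: ys, s => if p y then s :: pvMarks p ys (s + 1) else pvMarks p ys (s + 1)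

-- B's slicing stage, over Nat indices
def pvSegs (j : List String → String) (l : List String) (bs : List Nat) :
    List String :=
  ((0 :: bs).zip (bs ++ [l.length])).map (fun ab => j ((l.drop ab.1).take (ab.2 - ab.1)))

theorem pvA_H (p : String → Bool) (j : List String → String) :
    ∀ (l : List String) (ph cur : List String), cur ≠ [] →
      (let st := l.foldl (pvFA p j) (ph, cur);
        if st.2 ≠ [] then st.1 ++ [j st.2] else st.1) = ph ++ pvH p j cur l := by
  intro l
  induction l with
  | nil => intro ph cur h; simp [pvH, h]
  | cons x xs ih =>
    intro ph cur h
    simp only [List.foldl_cons, pvH]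
    by_cases hp : p x
    · have : pvFA p j (ph, cur) x = (ph ++ [j cur], [x]) := by
        simp [pvFA, hp, h]
      rw [this, ih _ [x] (by simp), hp]
      simp
    · have : pvFA p j (ph, cur) x = (ph, cur ++ [x]) := by
        simp [pvFA, hp]
      rw [this, ih _ (cur ++ [x]) (by simp)]
      simp [hp]

theorem pvMarks_all_false (p : String → Bool) :
    ∀ (l : List String), (∀ y ∈ l, p y = false) → ∀ s, pvMarks p l s = [] := by
  intro l
  induction l with
  | nil => intro _ s; rfl
  | cons y ys ih =>
    intro h s
    simp [pvMarks, h y (by simp)]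
    exact ih (fun z hz => h z (by simp [hz])) (s + 1)

theorem pvMarks_append_false (p : String → Bool) :
    ∀ (t : List String), (∀ y ∈ t, p y = false) → ∀ u s,
      pvMarks p (t ++ u) s = pvMarks p u (s + t.length) := by
  intro t
  induction t with
  | nil => intro _ u s; simp
  | cons y ys ih =>
    intro h u s
    simp only [List.cons_append, pvMarks, h y (by simp), Bool.false_eq_true, if_false]
    rw [ih (fun z hz => h z (by simp [hz])) u (s + 1)]
    simp only [List.length_cons]
    ring_nf

theorem pvMarks_shift (p : String → Bool) :
    ∀ (l : List String) (s k : Nat),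
      pvMarks p l (s + k) = (pvMarks p l s).map (· + k) := by
  intro l
  induction l with
  | nil => intro s k; rfl
  | cons y ys ih =>
    intro s k
    by_cases hp : p y
    · simp only [pvMarks, hp, if_true, List.map_cons]
      rw [show s + k + 1 = (s + 1) + k by ring, ih (s + 1) k]
    · simp only [pvMarks, hp, Bool.false_eq_true, if_false]
      rw [show s + k + 1 = (s + 1) + k by ring, ih (s + 1) k]

theorem pvH_all_false (p : String → Bool) (j : List String → String) :
    ∀ (l : List String), (∀ y ∈ l, p y = false) → ∀ cur,
      pvH p j cur l = [j (cur ++ l)] := by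
  intro l
  induction l with
  | nil => intro _ cur; simp [pvH]
  | cons y ys ih =>
    intro h cur
    simp only [pvH, h y (by simp), Bool.false_eq_true, if_false]
    rw [ih (fun z hz => h z (by simp [hz])) (cur ++ [y])]
    simp

theorem pvH_span (p : String → Bool) (j : List String → String) :
    ∀ (t : List String), (∀ y ∈ t, p y = false) → ∀ (m : String), p m = true → ∀ r cur,
      pvH p j cur (t ++ m :: r) = j (cur ++ t) :: pvH p j [m] r := by
  intro t
  induction t with
  | nil => intro _ m hm r cur; simp [pvH, hm]
  | cons y ys ih =>
    intro h m hm r cur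
    simp only [List.cons_append, pvH, h y (by simp), Bool.false_eq_true, if_false]
    rw [ih (fun z hz => h z (by simp [hz])) m hm r (cur ++ [y])]
    simp

-- the B pipeline equals the forward grouping
theorem pvSegs_H (p : String → Bool) (j : List String → String) :
    ∀ (n : Nat) (x : String) (xs : List String), xs.length ≤ n →
      pvSegs j (x :: xs) (pvMarks p xs 1) = pvH p j [x] xs := by
  intro n
  induction n with
  | zero =>
    intro x xs h
    have hx : xs = [] := List.eq_nil_of_length_eq_zero (Nat.le_zero.mp h)
    subst hx
    simp [pvSegs, pvMarks, pvH]
  | succ n ih =>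
    intro x xs h
    rcases hd : xs.dropWhile (fun y => !p y) with _ | ⟨m, r⟩
    · -- no marker line in xs
      have hall : ∀ y ∈ xs, p y = false := by
        have := (List.dropWhile_eq_nil_iff (l := xs) (p := fun y => !p y)).mp hd
        intro y hy
        simpa using this y hy
      rw [pvMarks_all_false p xs hall 1, pvH_all_false p j xs hall [x]]
      simp [pvSegs]
    · -- xs = t ++ m :: r with t marker-free and m a marker
      set t := xs.takeWhile (fun y => !p y) with ht
      have hxs : xs = t ++ m :: r := by
        rw [ht, ← hd, List.takeWhile_append_dropWhile]
      have htf : ∀ y ∈ t, p y = false := by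
        intro y hy
        have := List.mem_takeWhile_imp (l := xs) (p := fun y => !p y) hy
        simpa using this
      have hm : p m = true := by
        have := List.head?_dropWhile_not (fun y => !p y) xs
        rw [hd] at this
        simpa using this
      have hmarks : pvMarks p xs 1 = (t.length + 1) :: (pvMarks p r 1).map (· + (t.length + 1)) := by
        rw [hxs, pvMarks_append_false p t htf (m :: r) 1]
        simp only [pvMarks, hm, if_true]
        rw [show 1 + t.length = t.length + 1 by ring,
            show t.length + 1 + 1 = 1 + (t.length + 1) by ring,
            pvMarks_shift p r 1 (t.length + 1)]
      have hr : r.length ≤ n := by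
        have : xs.length = t.length + (r.length + 1) := by simp [hxs]
        omega
      have hih := ih m r hr
      rw [hmarks]
      -- unfold one step of the zip on the B side
      have hlen : (x :: xs).length = (t.length + 1) + (m :: r).length := by
        simp [hxs]; ring
      have hdropseg : ∀ a : Nat, ((x :: xs).drop ((t.length + 1) + a)) = (m :: r).drop a := by
        intro a
        have : x :: xs = (x :: t) ++ (m :: r) := by rw [hxs]; simp
        rw [this, show (t.length + 1) + a = (x :: t).length + a by simp,
            List.drop_append]
        simp
      have htail :
          (((t.length + 1) :: (pvMarks p r 1).map (· + (t.length + 1))).zip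
              ((pvMarks p r 1).map (· + (t.length + 1)) ++ [(x :: xs).length])).map
            (fun ab => j (((x :: xs).drop ab.1).take (ab.2 - ab.1)))
          = pvSegs j (m :: r) (pvMarks p r 1) := by
        rw [hlen]
        have h0 : (t.length + 1) :: (pvMarks p r 1).map (· + (t.length + 1))
            = (0 :: pvMarks p r 1).map (· + (t.length + 1)) := by
          simp
        have h1 : ((pvMarks p r 1).map (· + (t.length + 1)) ++ [(t.length + 1) + (m :: r).length])
            = ((pvMarks p r 1) ++ [(m :: r).length]).map (· + (t.length + 1)) := by
          simp [Nat.add_comm]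
        rw [h0, h1, List.zip_map]
        unfold pvSegs
        rw [List.map_map]
        apply List.map_congr_left
        intro ab _
        simp only [Function.comp, Prod.map]
        rw [show ab.1 + (t.length + 1) = (t.length + 1) + ab.1 by ring, hdropseg ab.1]
        congr 2
        omega
      have hfirst : ((x :: xs).drop 0).take ((t.length + 1) - 0) = x :: t := by
        simp only [List.drop_zero, Nat.sub_zero]
        rw [hxs, show x :: (t ++ m :: r) = (x :: t) ++ (m :: r) by simp,
            show t.length + 1 = (x :: t).length by simp]
        exact List.take_left
      calc pvSegs j (x :: xs) ((t.length + 1) :: (pvMarks p r 1).map (· + (t.length + 1)))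
          = j (x :: t) ::
            ((((t.length + 1) :: (pvMarks p r 1).map (· + (t.length + 1))).zip
                ((pvMarks p r 1).map (· + (t.length + 1)) ++ [(x :: xs).length])).map
              (fun ab => j (((x :: xs).drop ab.1).take (ab.2 - ab.1)))) := by
            unfold pvSegs
            simp only [List.zip_cons_cons, List.map_cons, List.cons_append]
            rw [hfirst]
      _ = j (x :: t) :: pvH p j [m] r := by rw [htail, hih]
      _ = pvH p j [x] xs := by
            rw [hxs, pvH_span p j t htf m hm r [x]]
            simp

-- bridge: the Int-indexed port pipeline equals the Nat-level pvSegs ∘ pvMarks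
theorem pvEnum_marks (p : String → Bool) :
    ∀ (l : List String) (s : Nat), 1 ≤ s →
      ((PySem.List.enumerate l (s : Int)).filter
          (fun il => decide ((0 : Int) < il.1) && p il.2)).map (·.1)
        = (pvMarks p l s).map (fun n : Nat => (n : Int)) := by
  intro l
  induction l with
  | nil => intro s _; simp [PySem.List.enumerate_nil, pvMarks]
  | cons y ys ih =>
    intro s hs
    rw [PySem.List.enumerate_cons]
    have hcast : (s : Int) + 1 = ((s + 1 : Nat) : Int) := by push_cast; ring
    by_cases hp : p y
    · simp only [List.filter_cons, hp, Bool.and_true,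
        decide_eq_true_eq, pvMarks, if_true]
      rw [if_pos (by exact_mod_cast hs), List.map_cons, hcast, ih (s + 1) (by omega)]
      simp
    · simp only [List.filter_cons, hp, Bool.and_false, pvMarks, Bool.false_eq_true, if_false]
      rw [hcast, ih (s + 1) (by omega)]

set_option maxHeartbeats 1000000 in
theorem pvAlt_segs (p : String → Bool) (j : List String → String)
    (x : String) (xs : List String)
    (hp : p = fun line => PySem.Str.startswith (PySem.Str.lower line) "# phase")
    (hj : j = PySem.Str.join "\n") :
    (let lines := x :: xs
     let bounds := ((PySem.List.enumerate lines).filter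
        (fun il => decide ((0 : Int) < il.1) &&
          PySem.Str.startswith (PySem.Str.lower il.2) "# phase")).map (·.1)
     (((0 : Int) :: bounds).zip (bounds ++ [PySem.List.len lines])).map
       (fun ab => PySem.Str.join "\n" (PySem.List.slice lines (some ab.1) (some ab.2))))
    = pvSegs j (x :: xs) (pvMarks p xs 1) := by
  subst hp hj
  simp only []
  have henum : PySem.List.enumerate (x :: xs) (0 : Int) = ((0 : Int), x) :: PySem.List.enumerate xs ((1 : Nat) : Int) := by
    rw [PySem.List.enumerate_cons]
    norm_num
  have hb : ((PySem.List.enumerate (x :: xs)).filter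
        (fun il => decide ((0 : Int) < il.1) &&
          PySem.Str.startswith (PySem.Str.lower il.2) "# phase")).map (·.1)
      = (pvMarks (fun line => PySem.Str.startswith (PySem.Str.lower line) "# phase") xs 1).map
          (fun n : Nat => (n : Int)) := by
    show ((PySem.List.enumerate (x :: xs) 0).filter _).map (·.1) = _
    rw [henum, List.filter_cons]
    simp only [lt_irrefl, decide_false, Bool.false_and, Bool.false_eq_true, if_false]
    exact pvEnum_marks (fun line => PySem.Str.startswith (PySem.Str.lower line) "# phase") xs 1 (le_refl 1)
  rw [hb]
  set P := fun line => PySem.Str.startswith (PySem.Str.lower line) "# phase" with hP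
  set bs := pvMarks P xs 1 with hbs
  have hlen : PySem.List.len (x :: xs) = (((x :: xs).length : Nat) : Int) := by
    simp [PySem.List.len_eq]
  have h0 : ((0 : Int) :: bs.map (fun n : Nat => (n : Int))) = (0 :: bs).map (fun n : Nat => (n : Int)) := by
    simp
  have h1 : (bs.map (fun n : Nat => (n : Int)) ++ [PySem.List.len (x :: xs)])
      = (bs ++ [(x :: xs).length]).map (fun n : Nat => (n : Int)) := by
    rw [hlen]; simp
  rw [h0, h1, List.zip_map]
  unfold pvSegs
  rw [List.map_map]
  apply List.map_congr_left
  intro ab _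
  simp only [Function.comp, Prod.map]
  rw [PySem.List.slice_natCast]

-- A's split never yields the empty list of lines
theorem pv_go_ne_nil (sep : List Char) : ∀ (fuel : Nat) (l cur : List Char) (acc : List (List Char)),
    PySem.Chars.splitOn.go sep fuel l cur acc ≠ [] := by
  intro fuel
  induction fuel with
  | zero => intro l cur acc; simp [PySem.Chars.splitOn.go]
  | succ n ih =>
    intro l cur acc
    cases l with
    | nil => simp [PySem.Chars.splitOn.go]
    | cons c rest =>
      rw [PySem.Chars.splitOn.go]
      split_ifs with h
      · exact ih _ _ _
      · exact ih _ _ _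

theorem pv_split_ne_nil (code : String) : (PySem.Str.split? code "\n").getD [] ≠ [] := by
  simp only [PySem.Str.split?, PySem.Chars.split?]
  rw [show ("\n".toList.isEmpty) = false by decide]
  simp only [Bool.false_eq_true, if_false]
  simp only [Option.map_some, Option.getD_some, ne_eq, List.map_eq_nil_iff]
  exact pv_go_ne_nil _ _ _ _ _

-- ===== VERDICT (by name: the statement is the Claim_ definition above) =====
theorem split_phases_spec : Claim_equal_split_phases := by
  intro code _
  show split_phases code = split_phases_alt code
  set p := fun line => PySem.Str.startswith (PySem.Str.lower line) "# phase" with hp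
  set j := PySem.Str.join "\n" with hj
  rcases hl : (PySem.Str.split? code "\n").getD [] with _ | ⟨x, xs⟩
  · exact absurd hl (pv_split_ne_nil code)
  · have hA : split_phases code = pvH p j [x] xs := by
      unfold split_phases
      rw [hl]
      have hstep : (x :: xs).foldl (pvFA p j) ([], []) = xs.foldl (pvFA p j) ([], [x]) := by
        by_cases hpx : p x
        · simp only [List.foldl_cons]; simp [pvFA, hpx]
        · simp only [List.foldl_cons]; simp [pvFA, hpx]
      have := pvA_H p j xs [] [x] (by simp)
      simp only at this
      show (let st := (x :: xs).foldl (pvFA p j) ([], []);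
        if st.2 ≠ [] then st.1 ++ [j st.2] else st.1) = pvH p j [x] xs
      rw [hstep]
      simpa using this
    have hB : split_phases_alt code = pvSegs j (x :: xs) (pvMarks p xs 1) := by
      unfold split_phases_alt
      rw [hl]
      exact pvAlt_segs p j x xs hp hj
    rw [hA, hB, pvSegs_H p j xs.length x xs (le_refl _)]
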